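-- pv_equiv track=rewrite | github.com/jalddak/ps_training | python/programmers/level 2/2 x n 타일링.py | solution
-- ===== SOURCE A (Python) =====
-- def solution(n):
--     answer = 0
--     first = 1
--     second = 2
--     for i in range(n-2):
--         sumfs = first + second
--         first = second
--         second = sumfs
--
--     return sumfs % 1000000007
-- ===== SOURCE B (Python) =====
-- def solution(n):
--     MOD = 1000000007
--     def fib_pair(k):
--         # returns (F(k) % MOD, F(k+1) % MOD) with F(0)=0, F(1)=1
--         if k == 0:
--             return (0, 1)
--         a, b = fib_pair(k >> 1)
--         c = a * (2 * b - a) % MOD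
--         d = (a * a + b * b) % MOD
--         if k & 1:
--             return (d, (c + d) % MOD)
--         return (c, d)
--     return fib_pair(n)[1]
-- ===== Notes on version B (the rewrite author's own statement) =====
-- stated objective: faster
-- what changed: Replaced the O(n) iterative Fibonacci loop (with unbounded big-int intermediates) by recursive fast-doubling of Fibonacci pairs modulo 1e9+7, O(log n).
-- crash fix: For 0 <= n < 3 A raises UnboundLocalError (the loop never runs and sumfs is unbound); B returns the Fibonacci tiling value there (n=0->1, n=1->1, n=2->2). — e.g. on solution(2): A raises UnboundLocalError, B returns 2
import Mathlib
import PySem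

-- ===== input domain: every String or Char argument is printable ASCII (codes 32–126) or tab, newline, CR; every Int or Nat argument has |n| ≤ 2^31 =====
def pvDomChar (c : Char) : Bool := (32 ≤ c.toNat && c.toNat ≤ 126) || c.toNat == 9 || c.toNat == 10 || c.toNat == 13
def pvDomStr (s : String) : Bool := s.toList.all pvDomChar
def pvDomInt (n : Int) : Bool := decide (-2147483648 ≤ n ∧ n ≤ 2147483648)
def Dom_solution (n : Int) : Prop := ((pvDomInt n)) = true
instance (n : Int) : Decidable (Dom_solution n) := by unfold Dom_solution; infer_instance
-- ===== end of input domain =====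

-- B replaces A's O(n) Fibonacci loop by O(log n) fast doubling mod 1e9+7; return values only.

-- ===== PORT A =====
-- sumfs is unbound before the loop; ported as Option Int (none = UnboundLocalError, excluded by Pre_).
def solution (n : Int) : Int :=
  let st := (PySem.List.pyRange 0 (n - 2) 1).foldl
    (fun (st : Int × Int × Option Int) _ =>
      let sumfs := st.1 + st.2.1
      (st.2.1, sumfs, some sumfs)) (1, 2, none)
  PySem.Int.mod (st.2.2.getD 0) 1000000007

-- ===== PORT B =====
-- fib_pair k = (F(k) % MOD, F(k+1) % MOD), fast doubling; Python's % has positive modulus here.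
def fibPair : Nat → Int × Int
  | 0 => (0, 1)
  | k+1 =>
      let p := fibPair ((k+1) / 2)
      let a := p.1
      let b := p.2
      let c := PySem.Int.mod (a * (2 * b - a)) 1000000007
      let d := PySem.Int.mod (a * a + b * b) 1000000007
      if (k+1) % 2 = 1 then (d, PySem.Int.mod (c + d) 1000000007) else (c, d)
decreasing_by exact Nat.div_lt_self (Nat.succ_pos k) (by norm_num)

def solution_alt (n : Int) : Int := (fibPair n.toNat).2

-- ===== PRECONDITION & SPEC =====
-- Pre_ excludes exactly n < 3: there A's loop body never runs and 'sumfs % …' raises UnboundLocalError.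
def Pre_solution (n : Int) : Prop := 3 ≤ n
instance (n : Int) : Decidable (Pre_solution n) := by unfold Pre_solution; infer_instance
def pvWitness_solution : Int := 5

-- For 0 ≤ n < 3 A raises UnboundLocalError; B returns the tiling count (1, 1, 2 respectively).
def Raises_solution (n : Int) : Prop := 0 ≤ n ∧ n < 3
instance (n : Int) : Decidable (Raises_solution n) := by unfold Raises_solution; infer_instance
def pvRaiseWitness_solution : Int := 2
def pvRaiseWitnessOut_solution : Int := 2

def Spec_solution (n : Int) (out : Int) : Prop := out = solution_alt n
instance (n : Int) (out : Int) : Decidable (Spec_solution n out) := by unfold Spec_solution; infer_instance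

-- ===== CLAIM (what is proved, stated in full; the proofs are below) =====
def Claim_equal_solution : Prop := ∀ (n : Int), Dom_solution n → Pre_solution n → Spec_solution n (solution n)
def Claim_raises_solution : Prop := (∀ (n : Int), Dom_solution n → Raises_solution n → ¬ Pre_solution n) ∧ (Dom_solution (pvRaiseWitness_solution) ∧ Raises_solution (pvRaiseWitness_solution) ∧ solution_alt (pvRaiseWitness_solution) = pvRaiseWitnessOut_solution)

-- ===== LEMMAS AND PROOFS =====

def M : Int := 1000000007

def fibZ (k : Nat) : Int := (Nat.fib k : Int)

-- one step of A's loop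
def gStep (st : Int × Int × Option Int) : Int × Int × Option Int :=
  (st.2.1, st.1 + st.2.1, some (st.1 + st.2.1))

lemma foldl_const_iterate {α β : Type} (g : α → α) (init : α) (l : List β) :
    l.foldl (fun st _ => g st) init = g^[l.length] init := by
  induction l generalizing init with
  | nil => rfl
  | cons x xs ih => simp [List.foldl, Function.iterate_succ_apply, ih]

lemma fibZ_add_two (k : Nat) : fibZ (k+2) = fibZ k + fibZ (k+1) := by
  simp only [fibZ, Nat.fib_add_two]
  push_cast
  ring

lemma gStep_iterate (m : Nat) (hm : 1 ≤ m) :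
    gStep^[m] (1, 2, none) = (fibZ (m+2), fibZ (m+3), some (fibZ (m+3))) := by
  induction m with
  | zero => omega
  | succ k ih =>
      rcases Nat.eq_or_lt_of_le hm with h | _h
      · simp only [← h]
        simp [gStep, fibZ, Nat.fib]
      · have hk : 1 ≤ k := by omega
        rw [Function.iterate_succ_apply', ih hk]
        simp only [gStep]
        have h1 : fibZ (k+2) + fibZ (k+3) = fibZ (k+1+3) := by
          have h := fibZ_add_two (k+2)
          rw [show (k+2)+2 = k+1+3 from by ring, show (k+2)+1 = k+3 from by ring] at h
          exact h.symm
        rw [show k+1+2 = k+3 from rfl, h1]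

lemma mod_eq (a : Int) : PySem.Int.mod a M = a % M :=
  PySem.Int.mod_eq_emod_of_pos (by norm_num [M])

lemma emod_self_modeq (x : Int) : x % M ≡ x [ZMOD M] :=
  Int.emod_emod_of_dvd x dvd_rfl

lemma fibZ_two_mul (m : Nat) : fibZ (2*m) = fibZ m * (2 * fibZ (m+1) - fibZ m) := by
  have hle : Nat.fib m ≤ 2 * Nat.fib (m+1) :=
    le_trans (Nat.fib_le_fib_succ) (by omega)
  have := Nat.fib_two_mul m
  simp only [fibZ]
  rw [this]
  push_cast [Nat.sub_add_cancel, hle]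
  ring

lemma fibZ_two_mul_add_one (m : Nat) : fibZ (2*m+1) = fibZ (m+1)^2 + fibZ m^2 := by
  have := Nat.fib_two_mul_add_one m
  simp only [fibZ]
  rw [this]
  push_cast
  ring

lemma fibPair_eq (k : Nat) : fibPair k = (fibZ k % M, fibZ (k+1) % M) := by
  induction k using Nat.strong_induction_on with
  | _ k ih =>
    match k with
    | 0 => simp [fibPair, fibZ, M]
    | Nat.succ k =>
      have hlt : (k+1) / 2 < k + 1 := Nat.div_lt_self (Nat.succ_pos k) (by norm_num)
      rw [fibPair, ih _ hlt]
      set m := (k+1) / 2 with hm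
      have hMc : (1000000007 : Int) = M := rfl
      have hc : PySem.Int.mod (fibZ m % M * (2 * (fibZ (m+1) % M) - fibZ m % M)) 1000000007
          = fibZ (2*m) % M := by
        rw [hMc, mod_eq, fibZ_two_mul]
        exact ((emod_self_modeq (fibZ m)).mul
          (((Int.ModEq.refl 2).mul (emod_self_modeq (fibZ (m+1)))).sub
            (emod_self_modeq (fibZ m))))
      have hd : PySem.Int.mod (fibZ m % M * (fibZ m % M) + fibZ (m+1) % M * (fibZ (m+1) % M)) 1000000007
          = fibZ (2*m+1) % M := by
        rw [hMc, mod_eq, fibZ_two_mul_add_one]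
        have : fibZ m % M * (fibZ m % M) + fibZ (m+1) % M * (fibZ (m+1) % M)
            ≡ fibZ m * fibZ m + fibZ (m+1) * fibZ (m+1) [ZMOD M] :=
          ((emod_self_modeq (fibZ m)).mul (emod_self_modeq (fibZ m))).add
            ((emod_self_modeq (fibZ (m+1))).mul (emod_self_modeq (fibZ (m+1))))
        calc (fibZ m % M * (fibZ m % M) + fibZ (m+1) % M * (fibZ (m+1) % M)) % M
            = (fibZ m * fibZ m + fibZ (m+1) * fibZ (m+1)) % M := this
          _ = (fibZ (m+1)^2 + fibZ m^2) % M := by ring_nf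
      simp only [hc, hd]
      rcases Nat.even_or_odd (k+1) with he | ho
      · obtain ⟨t, ht⟩ := he
        have hmt : m = t := by omega
        have hodd : ¬ (k+1) % 2 = 1 := by omega
        rw [if_neg hodd, hmt, show 2*t+1 = k+1+1 from by omega,
          show 2*t = k+1 from by omega]
      · obtain ⟨t, ht⟩ := ho
        have hmt : m = t := by omega
        have hodd : (k+1) % 2 = 1 := by omega
        rw [if_pos hodd, hmt]
        have h1 : 2 * t + 1 = k + 1 := by omega
        have hsum : PySem.Int.mod (fibZ (2*t) % M + fibZ (2*t+1) % M) 1000000007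
            = fibZ (2*t+2) % M := by
          rw [hMc, mod_eq, show (2*t+2) = (2*t)+2 from rfl, fibZ_add_two,
            show 2*t+1 = (2*t)+1 from rfl]
          exact (emod_self_modeq (fibZ (2*t))).add (emod_self_modeq (fibZ (2*t+1)))
        rw [hsum, show 2*t+2 = k+1+1 from by omega, h1]

-- ===== VERDICT (by name: the statement is the Claim_ definition above) =====
theorem solution_spec : Claim_equal_solution := by
  intro n _ hpre
  unfold Spec_solution solution solution_alt
  have hpre3 : (3 : Int) ≤ n := hpre
  have hlen : (PySem.List.pyRange 0 (n-2) 1).length = (n-2).toNat := by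
    simp [PySem.List.length_pyRange_one]
  set m : Nat := (n-2).toNat with hmdef
  have hm1 : 1 ≤ m := by omega
  have hfold : (PySem.List.pyRange 0 (n - 2) 1).foldl
      (fun (st : Int × Int × Option Int) _ =>
        let sumfs := st.1 + st.2.1
        (st.2.1, sumfs, some sumfs)) (1, 2, none)
      = gStep^[m] (1, 2, none) := by
    rw [show (fun (st : Int × Int × Option Int) (_ : Int) =>
        let sumfs := st.1 + st.2.1
        (st.2.1, sumfs, some sumfs)) = (fun st _ => gStep st) from rfl,
      foldl_const_iterate, hlen]
  rw [hfold, gStep_iterate m hm1]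
  have hton : n.toNat = m + 2 := by omega
  rw [hton, fibPair_eq]
  simp only [Option.getD_some]
  rw [show (1000000007 : Int) = M from rfl, mod_eq]

@[simp] theorem solution_raises : Claim_raises_solution := by
  unfold Claim_raises_solution
  refine ⟨fun n _ h => by unfold Raises_solution Pre_solution at *; omega, by decide, by decide, ?_⟩
  show (fibPair (2 : Int).toNat).2 = 2
  rw [show (2 : Int).toNat = 2 from rfl, fibPair_eq]
  norm_num [fibZ, M]
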